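-- pv_equiv track=rewrite | github.com/Stahhl/mindblast | scripts/quiz_forge/cli.py | _preferred_factoid_answer_kind
-- ===== SOURCE A (Python) =====
-- def _preferred_factoid_answer_kind(recent_kinds: list[str]) -> str | None:
--     person_count = sum(1 for kind in recent_kinds if kind == "person")
--     place_count = sum(1 for kind in recent_kinds if kind == "place")
--     if person_count == place_count:
--         return None
--     if person_count > place_count:
--         return "place"
--     return "person"
-- ===== SOURCE B (Python) =====
-- _SIGN = {"person": 1, "place": -1}
--
--
-- def _preferred_factoid_answer_kind(recent_kinds: list[str]) -> str | None:
--     net = sum(_SIGN.get(kind, 0) for kind in recent_kinds)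
--     if net:
--         return "place" if net > 0 else "person"
--     return None
-- ===== Notes on version B (the rewrite author's own statement) =====
-- stated objective: simpler
-- what changed: Replaces the two separate counting comprehensions and count comparison with a single summed lookup in a sign table {'person': +1, 'place': -1}, deciding by the sign of that one sum.
import Mathlib
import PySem

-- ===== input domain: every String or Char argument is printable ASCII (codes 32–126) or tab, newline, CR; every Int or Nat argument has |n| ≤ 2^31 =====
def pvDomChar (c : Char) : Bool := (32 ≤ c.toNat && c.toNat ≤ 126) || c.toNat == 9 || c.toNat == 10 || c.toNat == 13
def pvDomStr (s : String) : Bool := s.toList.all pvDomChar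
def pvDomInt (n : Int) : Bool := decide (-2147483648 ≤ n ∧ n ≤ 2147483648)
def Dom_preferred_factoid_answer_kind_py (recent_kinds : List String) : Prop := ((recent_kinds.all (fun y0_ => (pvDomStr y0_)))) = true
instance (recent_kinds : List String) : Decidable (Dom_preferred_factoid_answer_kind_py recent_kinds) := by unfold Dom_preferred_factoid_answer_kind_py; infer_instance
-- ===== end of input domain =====

-- B replaces A's two count comprehensions with one summed sign-table lookup; objective: simpler.


-- ===== PORT A =====
-- Port of A: two count folds (the two sum comprehensions) then the branch chain.
def preferred_factoid_answer_kind_py (recent_kinds : List String) : Option String :=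
  let person_count : Int := recent_kinds.foldl (fun acc kind => if kind == "person" then acc + 1 else acc) 0
  let place_count : Int := recent_kinds.foldl (fun acc kind => if kind == "place" then acc + 1 else acc) 0
  if person_count == place_count then none
  else if person_count > place_count then some "place"
  else some "person"

-- ===== PORT B =====
-- Port of B: the module-level sign table _SIGN.
def pvSign : PySem.Dict String Int := PySem.Dict.ofList [("person", 1), ("place", -1)]

-- Port of B: sum the sign-table lookups, decide by the sign of the sum.
def preferred_factoid_answer_kind_py_alt (recent_kinds : List String) : Option String :=
  let net : Int := (recent_kinds.map (fun kind => PySem.Dict.getD pvSign kind 0)).sum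
  if net ≠ 0 then (if net > 0 then some "place" else some "person")
  else none

-- ===== PRECONDITION & SPEC =====
def Spec_preferred_factoid_answer_kind_py (recent_kinds : List String) (out : Option String) : Prop := out = preferred_factoid_answer_kind_py_alt recent_kinds
instance (recent_kinds : List String) (out : Option String) : Decidable (Spec_preferred_factoid_answer_kind_py recent_kinds out) := by unfold Spec_preferred_factoid_answer_kind_py; infer_instance

-- ===== CLAIM =====
def Claim_equal_preferred_factoid_answer_kind_py : Prop := ∀ (recent_kinds : List String), Dom_preferred_factoid_answer_kind_py recent_kinds → Spec_preferred_factoid_answer_kind_py recent_kinds (preferred_factoid_answer_kind_py recent_kinds)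

-- ===== LEMMAS AND PROOFS =====

lemma pvSign_getD (k : String) :
    PySem.Dict.getD pvSign k 0 = if k = "person" then (1:Int) else if k = "place" then -1 else 0 := by
  have hm : pvSign = PySem.Dict.mk [("person", 1), ("place", -1)] := by decide
  rw [hm]
  simp [PySem.Dict.getD, PySem.Dict.get?_mk_cons]
  by_cases h1 : "person" = k
  · subst h1; simp
  · by_cases h2 : "place" = k
    · subst h2; simp [Ne.symm h1]
    · simp [h1, h2, Ne.symm h1, Ne.symm h2, PySem.Dict.get?]

lemma pv_sum_eq (recent_kinds : List String) (a b : Int) :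
    (recent_kinds.map (fun kind => PySem.Dict.getD pvSign kind 0)).sum + (a - b)
    = recent_kinds.foldl (fun acc kind => if kind == "person" then acc + 1 else acc) a
      - recent_kinds.foldl (fun acc kind => if kind == "place" then acc + 1 else acc) b := by
  induction recent_kinds generalizing a b with
  | nil => simp
  | cons x xs ih =>
    simp only [List.map_cons, List.sum_cons, List.foldl_cons]
    by_cases hx : x = "person"
    · have := ih (a + 1) b
      rw [pvSign_getD]; simp [hx] at this ⊢
      omega
    · by_cases hy : x = "place"
      · have := ih a (b + 1)
        rw [pvSign_getD]; simp [hy] at this ⊢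
        omega
      · have := ih a b
        have h1 : (x == "person") = false := by simp [hx]
        have h2 : (x == "place") = false := by simp [hy]
        rw [pvSign_getD]; simp [hx, hy, h1, h2] at this ⊢
        omega

-- ===== VERDICT =====
theorem preferred_factoid_answer_kind_py_spec : Claim_equal_preferred_factoid_answer_kind_py := by
  intro recent_kinds _
  unfold Spec_preferred_factoid_answer_kind_py
  unfold preferred_factoid_answer_kind_py preferred_factoid_answer_kind_py_alt
  have h := pv_sum_eq recent_kinds 0 0
  set s := (recent_kinds.map (fun kind => PySem.Dict.getD pvSign kind 0)).sum
  set a := recent_kinds.foldl (fun acc kind => if kind == "person" then acc + 1 else acc) (0:Int)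
  set b := recent_kinds.foldl (fun acc kind => if kind == "place" then acc + 1 else acc) (0:Int)
  by_cases hab : a = b
  · have : s = 0 := by omega
    simp [hab, this]
  · have hs : s ≠ 0 := by omega
    have h1 : (a == b) = false := by simp [hab]
    by_cases hgt : a > b
    · have : s > 0 := by omega
      simp [h1, hgt, hs, this]
    · have : ¬ s > 0 := by omega
      simp [h1, hgt, hs, this]
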